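-- pv_equiv track=rewrite | github.com/tacowasabii/online-judge | 프로그래머스/1/42840. 모의고사/모의고사.py | solution
-- ===== SOURCE A (Python) =====
-- def solution(answers):
--     answer = []
--     s1 = [1,2,3,4,5]
--     s2 = [2,1,2,3,2,4,2,5]
--     s3 = [3,3,1,1,2,2,4,4,5,5]
--     ss = [s1,s2,s3]
--
--     scores = []
--     for s in ss:
--         score = 0
--         for i, v in enumerate(answers):
--             if v == s[i % len(s)]:
--                 score += 1
--         scores.append(score)
--     max_score = max(scores)
--
--     for i in range(3):
--         if max_score == scores[i]:
--             answer.append(i + 1)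
--
--     return answer
-- ===== SOURCE B (Python) =====
-- def solution(answers):
--     patterns = [[1, 2, 3, 4, 5],
--                 [2, 1, 2, 3, 2, 4, 2, 5],
--                 [3, 3, 1, 1, 2, 2, 4, 4, 5, 5]]
--     # Histogram: one pass builds a frequency table keyed by (position mod 40, answer);
--     # 40 = lcm of the pattern lengths, so each pattern's score is 40 table lookups.
--     cnt = {}
--     for i, v in enumerate(answers):
--         key = (i % 40, v)
--         cnt[key] = cnt.get(key, 0) + 1
--     scores = [sum(cnt.get((r, p[r % len(p)]), 0) for r in range(40)) for p in patterns]
--     m = max(scores)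
--     return [i + 1 for i, sc in enumerate(scores) if sc == m]
-- ===== Notes on version B (the rewrite author's own statement) =====
-- stated objective: alternative
-- what changed: A runs one counting pass over answers per pattern; B instead builds a frequency table keyed by (index mod 40, answer) in a single pass (40 = lcm of the pattern lengths) and reads each pattern's score off as 40 table lookups, then selects the argmax indices by an enumerate-comprehension.
import Mathlib
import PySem

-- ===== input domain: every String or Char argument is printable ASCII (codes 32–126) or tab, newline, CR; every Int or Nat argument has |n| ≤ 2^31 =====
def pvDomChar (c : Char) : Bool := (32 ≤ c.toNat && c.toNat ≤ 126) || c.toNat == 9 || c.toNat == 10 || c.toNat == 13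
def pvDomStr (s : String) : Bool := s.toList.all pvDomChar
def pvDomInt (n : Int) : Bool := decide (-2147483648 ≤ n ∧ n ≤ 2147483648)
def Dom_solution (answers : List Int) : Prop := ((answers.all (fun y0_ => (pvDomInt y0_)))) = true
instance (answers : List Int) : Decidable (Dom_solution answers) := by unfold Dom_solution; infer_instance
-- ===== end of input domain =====

-- B replaces A's three per-pattern counting passes by a different data structure: one pass builds a
-- frequency table keyed by (index mod 40, answer) (40 = lcm of the pattern lengths), after which each
-- pattern's score is read off as 40 table lookups; same O(n) cost, a genuinely different algorithm.

-- ===== PORT A =====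
def solution (answers : List Int) : List Int :=
  let s1 : List Int := [1,2,3,4,5]
  let s2 : List Int := [2,1,2,3,2,4,2,5]
  let s3 : List Int := [3,3,1,1,2,2,4,4,5,5]
  let ss : List (List Int) := [s1, s2, s3]
  let scores : List Int := ss.foldl (fun scores s =>
    scores ++ [(PySem.List.enumerate answers 0).foldl
      (fun score iv =>
        -- s[i % len(s)]: index is in [0, len s), so the default is never used (exact)
        if iv.2 = PySem.List.pyGetD s (PySem.Int.mod iv.1 (PySem.List.len s)) 0 then score + 1 else score) 0]) []
  -- max(scores): scores has three elements, so Python's max never raises (exact)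
  let maxScore : Int := (PySem.List.max? scores (fun y => y)).getD 0
  (PySem.List.pyRange 0 3 1).foldl (fun answer i =>
    if maxScore = PySem.List.pyGetD scores i 0 then answer ++ [i + 1] else answer) []

-- ===== PORT B =====
def solution_alt (answers : List Int) : List Int :=
  let patterns : List (List Int) := [[1,2,3,4,5], [2,1,2,3,2,4,2,5], [3,3,1,1,2,2,4,4,5,5]]
  -- cnt[key] = cnt.get(key, 0) + 1 with key = (i % 40, v)
  let cnt : PySem.Dict (Int × Int) Int :=
    (PySem.List.enumerate answers 0).foldl
      (fun d iv => d.insert (PySem.Int.mod iv.1 40, iv.2)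
                            (d.getD (PySem.Int.mod iv.1 40, iv.2) 0 + 1))
      PySem.Dict.empty
  -- sum(cnt.get((r, p[r % len(p)]), 0) for r in range(40)) per pattern
  let scores : List Int := patterns.map (fun p =>
    (PySem.List.pyRange 0 40 1).foldl
      (fun acc r => acc + cnt.getD (r, PySem.List.pyGetD p (PySem.Int.mod r (PySem.List.len p)) 0) 0) 0)
  -- max(scores): three elements, never raises (exact)
  let m : Int := (PySem.List.max? scores (fun y => y)).getD 0
  (PySem.List.enumerate scores 0).filterMap (fun isc => if isc.2 = m then some (isc.1 + 1) else none)

-- ===== PRECONDITION & SPEC =====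
def Spec_solution (answers : List Int) (out : List Int) : Prop := out = solution_alt answers
instance (answers : List Int) (out : List Int) : Decidable (Spec_solution answers out) := by unfold Spec_solution; infer_instance

-- ===== CLAIM (what is proved, stated in full; the proofs are below) =====
def Claim_equal_solution : Prop := ∀ (answers : List Int), Dom_solution answers → Spec_solution answers (solution answers)

-- ===== LEMMAS AND PROOFS =====

-- The counter dict's lookup is a countP over the fed pairs.
theorem cnt_getD (l : List (Int × Int)) (d : PySem.Dict (Int × Int) Int) (q : Int × Int) :
    (l.foldl (fun d iv => d.insert (PySem.Int.mod iv.1 40, iv.2)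
                                   (d.getD (PySem.Int.mod iv.1 40, iv.2) 0 + 1)) d).getD q 0
    = d.getD q 0 + (l.countP (fun iv => (PySem.Int.mod iv.1 40, iv.2) == q) : Int) := by
  induction l generalizing d with
  | nil => simp
  | cons x t ih =>
    rw [List.foldl_cons, ih, PySem.Dict.getD_insert, List.countP_cons]
    by_cases h : q = (PySem.Int.mod x.1 40, x.2)
    · rw [if_pos h, h]
      have h2 : (((PySem.Int.mod x.1 40, x.2) == (PySem.Int.mod x.1 40, x.2)) = true) := by
        simp only [beq_iff_eq]
      rw [if_pos h2]
      push_cast; ring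
    · have h2 : ¬ (((PySem.Int.mod x.1 40, x.2) == q) = true) := by
        simp only [beq_iff_eq]; exact fun e => h e.symm
      rw [if_neg h, if_neg h2]
      push_cast; ring

-- A 0/1 indicator summed over range(40) fires at exactly the residue c.
theorem sum_ind (c v : Int) (hc0 : 0 ≤ c) (hc : c < 40) (g : Int → Int) :
    ((PySem.List.pyRange 0 40 1).map (fun r => if (c, v) = (r, g r) then (1 : Int) else 0)).sum
    = if v = g c then 1 else 0 := by
  rw [PySem.List.pyRange_one_append 0 c 40 hc0 (le_of_lt hc),
      PySem.List.pyRange_one_cons hc, List.map_append, List.map_cons, List.sum_append, List.sum_cons]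
  have h1 : ((PySem.List.pyRange 0 c 1).map (fun r => if (c, v) = (r, g r) then (1 : Int) else 0)).sum = 0 := by
    apply List.sum_eq_zero; intro x hx
    simp only [List.mem_map] at hx
    obtain ⟨r, hr, rfl⟩ := hx
    rw [PySem.List.mem_pyRange_one] at hr
    rw [if_neg]; intro e; rw [Prod.mk.injEq] at e; omega
  have h2 : ((PySem.List.pyRange (c+1) 40 1).map (fun r => if (c, v) = (r, g r) then (1 : Int) else 0)).sum = 0 := by
    apply List.sum_eq_zero; intro x hx
    simp only [List.mem_map] at hx
    obtain ⟨r, hr, rfl⟩ := hx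
    rw [PySem.List.mem_pyRange_one] at hr
    rw [if_neg]; intro e; rw [Prod.mk.injEq] at e; omega
  rw [h1, h2]
  by_cases hv : v = g c
  · rw [if_pos (by rw [hv]), if_pos hv]; norm_num
  · rw [if_neg (fun e => hv (congrArg Prod.snd e)), if_neg hv]; norm_num

-- Summing the per-residue counts over range(40) yields A's per-element match count.
theorem sum_countP (p : List Int) (hpos : 0 < PySem.List.len p) (hdvd : PySem.List.len p ∣ 40)
    (l : List (Int × Int)) :
    ((PySem.List.pyRange 0 40 1).map (fun r =>
        (l.countP (fun iv => (PySem.Int.mod iv.1 40, iv.2)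
            == (r, PySem.List.pyGetD p (PySem.Int.mod r (PySem.List.len p)) 0)) : Int))).sum
    = (l.countP (fun iv => iv.2 == PySem.List.pyGetD p (PySem.Int.mod iv.1 (PySem.List.len p)) 0) : Int) := by
  induction l with
  | nil => simp
  | cons x t ih =>
    have key : (fun r : Int =>
          (((x :: t).countP (fun iv => (PySem.Int.mod iv.1 40, iv.2)
              == (r, PySem.List.pyGetD p (PySem.Int.mod r (PySem.List.len p)) 0))) : Int))
        = (fun r : Int =>
          ((t.countP (fun iv => (PySem.Int.mod iv.1 40, iv.2)
              == (r, PySem.List.pyGetD p (PySem.Int.mod r (PySem.List.len p)) 0))) : Int)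
          + (if (PySem.Int.mod x.1 40, x.2)
              = (r, PySem.List.pyGetD p (PySem.Int.mod r (PySem.List.len p)) 0) then 1 else 0)) := by
      funext r
      rw [List.countP_cons]
      push_cast
      by_cases h : (PySem.Int.mod x.1 40, x.2)
          = (r, PySem.List.pyGetD p (PySem.Int.mod r (PySem.List.len p)) 0)
      · rw [if_pos (by simp only [beq_iff_eq]; exact h), if_pos h]
      · rw [if_neg (by simp only [beq_iff_eq]; exact h), if_neg h]
    rw [key, PySem.List.sum_map_add_int, ih]
    have hm : PySem.Int.mod x.1 40 = x.1 % 40 := PySem.Int.mod_eq_emod_of_pos (by norm_num)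
    have hc0 : 0 ≤ PySem.Int.mod x.1 40 := by rw [hm]; exact Int.emod_nonneg _ (by norm_num)
    have hc : PySem.Int.mod x.1 40 < 40 := by rw [hm]; exact Int.emod_lt_of_pos _ (by norm_num)
    rw [sum_ind (PySem.Int.mod x.1 40) x.2 hc0 hc
        (fun r => PySem.List.pyGetD p (PySem.Int.mod r (PySem.List.len p)) 0)]
    have hmodmod : PySem.Int.mod (PySem.Int.mod x.1 40) (PySem.List.len p)
        = PySem.Int.mod x.1 (PySem.List.len p) := by
      rw [hm, PySem.Int.mod_eq_emod_of_pos hpos, PySem.Int.mod_eq_emod_of_pos hpos]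
      exact Int.emod_emod_of_dvd x.1 hdvd
    rw [hmodmod, List.countP_cons]
    push_cast
    by_cases h : x.2 = PySem.List.pyGetD p (PySem.Int.mod x.1 (PySem.List.len p)) 0
    · rw [if_pos h, if_pos (by simp only [beq_iff_eq]; exact h)]
    · rw [if_neg h, if_neg (by simp only [beq_iff_eq]; exact h)]

-- Core: B's 40 histogram lookups for a pattern p equal A's counting pass for p.
-- foldl of adding a residue-keyed dict lookup over a range, as a map-sum (first-order form).
theorem foldl_add_getD (R : List Int) (D : PySem.Dict (Int × Int) Int) (p : List Int) (a : Int) :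
    R.foldl (fun acc r => acc + D.getD (r, PySem.List.pyGetD p (PySem.Int.mod r (PySem.List.len p)) 0) 0) a
    = a + (R.map (fun r => D.getD (r, PySem.List.pyGetD p (PySem.Int.mod r (PySem.List.len p)) 0) 0)).sum := by
  induction R generalizing a with
  | nil => simp
  | cons r t ih =>
    rw [List.foldl_cons, ih, List.map_cons, List.sum_cons]
    ring

-- A's counting fold for a pattern p, as a countP (first-order form).
theorem foldl_if_count (p : List Int) (l : List (Int × Int)) (a : Int) :
    l.foldl (fun score iv =>
        if iv.2 = PySem.List.pyGetD p (PySem.Int.mod iv.1 (PySem.List.len p)) 0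
        then score + 1 else score) a
    = a + (l.countP (fun iv => iv.2 == PySem.List.pyGetD p (PySem.Int.mod iv.1 (PySem.List.len p)) 0) : Int) := by
  induction l generalizing a with
  | nil => simp
  | cons x t ih =>
    rw [List.foldl_cons, List.countP_cons]
    by_cases h : x.2 = PySem.List.pyGetD p (PySem.Int.mod x.1 (PySem.List.len p)) 0
    · rw [if_pos h, ih, if_pos (by simp only [beq_iff_eq]; exact h)]
      push_cast; ring
    · rw [if_neg h, ih, if_neg (by simp only [beq_iff_eq]; exact h)]
      push_cast; ring

-- Core: B's 40 histogram lookups for a pattern p equal A's counting pass for p.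
theorem core (p : List Int) (hpos : 0 < PySem.List.len p) (hdvd : PySem.List.len p ∣ 40)
    (l : List (Int × Int)) :
    (PySem.List.pyRange 0 40 1).foldl
      (fun acc r => acc + ((l.foldl (fun d iv => d.insert (PySem.Int.mod iv.1 40, iv.2)
                                   (d.getD (PySem.Int.mod iv.1 40, iv.2) 0 + 1))
                    (PySem.Dict.empty : PySem.Dict (Int × Int) Int))).getD
          (r, PySem.List.pyGetD p (PySem.Int.mod r (PySem.List.len p)) 0) 0) (0 : Int)
    = l.foldl (fun score iv =>
        if iv.2 = PySem.List.pyGetD p (PySem.Int.mod iv.1 (PySem.List.len p)) 0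
        then score + 1 else score) (0 : Int) := by
  rw [foldl_add_getD, foldl_if_count, zero_add, zero_add]
  have hfun : (fun r : Int => ((l.foldl (fun d iv => d.insert (PySem.Int.mod iv.1 40, iv.2)
          (d.getD (PySem.Int.mod iv.1 40, iv.2) 0 + 1))
          (PySem.Dict.empty : PySem.Dict (Int × Int) Int))).getD
          (r, PySem.List.pyGetD p (PySem.Int.mod r (PySem.List.len p)) 0) 0)
      = (fun r : Int => (l.countP (fun iv => (PySem.Int.mod iv.1 40, iv.2)
          == (r, PySem.List.pyGetD p (PySem.Int.mod r (PySem.List.len p)) 0)) : Int)) := by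
    funext r
    rw [cnt_getD, PySem.Dict.getD_empty, zero_add]
  rw [hfun, sum_countP p hpos hdvd l]

-- The final selection: A's range(3) fold over the scores equals B's enumerate filterMap.
theorem select_eq (a b c m : Int) :
    (PySem.List.pyRange 0 3 1).foldl (fun answer i =>
      if m = PySem.List.pyGetD [a, b, c] i 0 then answer ++ [i + 1] else answer) []
    = (PySem.List.enumerate [a, b, c] 0).filterMap
        (fun isc => if isc.2 = m then some (isc.1 + 1) else none) := by
  rw [show PySem.List.pyRange 0 3 1 = [0, 1, 2] from by decide]
  have g0 : PySem.List.pyGetD [a, b, c] (0 : Int) 0 = a := rfl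
  have g1 : PySem.List.pyGetD [a, b, c] (1 : Int) 0 = b := rfl
  have g2 : PySem.List.pyGetD [a, b, c] (2 : Int) 0 = c := rfl
  simp only [List.foldl_cons, List.foldl_nil, g0, g1, g2,
    PySem.List.enumerate_cons, PySem.List.enumerate_nil, List.filterMap_cons, List.filterMap_nil]
  simp only [show ∀ x : Int, (x = m) = (m = x) from fun x => propext eq_comm]
  split_ifs <;> rfl

-- ===== VERDICT (by name: the statement is the Claim_ definition above) =====
theorem solution_spec : Claim_equal_solution := by
  intro answers _
  unfold Spec_solution solution solution_alt
  simp only [List.foldl, List.map_cons, List.map_nil, List.nil_append, List.cons_append]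
  have h1 := core [1,2,3,4,5] (by decide) (by decide) (PySem.List.enumerate answers 0)
  have h2 := core [2,1,2,3,2,4,2,5] (by decide) (by decide) (PySem.List.enumerate answers 0)
  have h3 := core [3,3,1,1,2,2,4,4,5,5] (by decide) (by decide) (PySem.List.enumerate answers 0)
  simp only [h1, h2, h3]
  exact select_eq _ _ _ _
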